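-- pv_equiv track=rewrite | github.com/ylsdamxssjxxdd/wunder | app/orchestrator/engine.py | _locate_tail_block_start
-- ===== SOURCE A (Python) =====
-- from typing import Any, AsyncGenerator, Dict, List, Optional, Sequence, Set, Tuple
--
-- def _locate_tail_block_start(messages: List[Dict[str, Any]]) -> int:
--     """定位需要整体保留的尾部消息块起点。"""
--     if not messages:
--         return 0
--     last_user_index = None
--     for index in range(len(messages) - 1, -1, -1):
--         message = messages[index]
--         if isinstance(message, dict) and message.get("role") == "user":
--             last_user_index = index
--             break
--     if last_user_index is None:
--         return max(0, len(messages) - 1)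
--     assistant_index = None
--     for index in range(last_user_index - 1, -1, -1):
--         message = messages[index]
--         if isinstance(message, dict) and message.get("role") == "assistant":
--             assistant_index = index
--             break
--     if assistant_index is None:
--         return last_user_index
--     for index in range(assistant_index - 1, -1, -1):
--         message = messages[index]
--         if isinstance(message, dict) and message.get("role") == "user":
--             return index
--     return assistant_index
-- ===== SOURCE B (Python) =====
-- from typing import Any, Dict, List
--
-- def _locate_tail_block_start(messages: List[Dict[str, Any]]) -> int:
--     """Locate the start of the tail message block to keep (forward-pass index lists)."""
--     if not messages:
--         return 0
--     n = len(messages)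
--     users = [i for i in range(n)
--              if isinstance(messages[i], dict) and messages[i].get("role") == "user"]
--     if not users:
--         return max(0, n - 1)
--     last_user = users[-1]
--     assistants = [i for i in range(n)
--                   if isinstance(messages[i], dict) and messages[i].get("role") == "assistant"]
--     a_before = [i for i in assistants if i < last_user]
--     if not a_before:
--         return last_user
--     assistant_index = a_before[-1]
--     u_before = [i for i in users if i < assistant_index]
--     return u_before[-1] if u_before else assistant_index
-- ===== Notes on version B (the rewrite author's own statement) =====
-- stated objective: alternative
-- what changed: A locates indices with three backward early-exit scans chained by fallbacks; B does forward passes building the full user/assistant index lists once and answers by filtering those lists (last element below a bound), with the empty-list and no-user cases handled up front.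
import Mathlib
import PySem

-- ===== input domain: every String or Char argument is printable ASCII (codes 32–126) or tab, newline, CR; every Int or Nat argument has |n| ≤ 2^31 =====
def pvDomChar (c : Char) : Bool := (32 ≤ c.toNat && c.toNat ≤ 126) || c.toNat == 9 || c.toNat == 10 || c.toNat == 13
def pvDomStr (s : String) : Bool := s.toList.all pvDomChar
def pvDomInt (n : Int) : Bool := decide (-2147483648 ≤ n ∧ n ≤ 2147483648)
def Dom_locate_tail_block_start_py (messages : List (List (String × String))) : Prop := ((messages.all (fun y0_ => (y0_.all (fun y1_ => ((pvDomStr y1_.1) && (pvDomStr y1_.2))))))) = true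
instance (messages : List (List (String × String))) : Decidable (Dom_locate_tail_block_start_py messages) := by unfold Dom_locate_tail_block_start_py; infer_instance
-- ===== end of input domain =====

-- B replaces A's three backward scans with one forward pass per role (index-list comprehensions) and selects by filtering; objective: alternative decomposition, same asymptotic cost.


-- ===== PORT A =====
-- A searches backward with three loops (for index in range(k-1,-1,-1)); here each backward
-- loop is the structural recursion findBack, checking messages[index] from k-1 down to 0.
-- messages[index] is always in range in A (index < len), so List.getD is exact here.
def roleIs (m : List (String × String)) (r : String) : Bool :=
  ((m.find? (fun p => p.1 == "role")).map (·.2)) == some r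

def findBack (msgs : List (List (String × String))) (r : String) : Nat → Option Nat
  | 0 => none
  | n + 1 => if roleIs (msgs.getD n []) r then some n else findBack msgs r n

def locate_tail_block_start_py (messages : List (List (String × String))) : Int :=
  if messages.isEmpty then 0
  else
    match findBack messages "user" messages.length with
    | none => max 0 ((messages.length : Int) - 1)
    | some last_user_index =>
      match findBack messages "assistant" last_user_index with
      | none => (last_user_index : Int)
      | some assistant_index =>
        match findBack messages "user" assistant_index with
        | some i => (i : Int)
        | none => (assistant_index : Int)

-- ===== PORT B =====
-- B builds the forward index lists once and picks by filtering (Source B's comprehensions).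
def roleIdxs (msgs : List (List (String × String))) (r : String) : List Nat :=
  (List.range msgs.length).filter (fun i => roleIs (msgs.getD i []) r)

def locate_tail_block_start_py_alt (messages : List (List (String × String))) : Int :=
  if messages.isEmpty then 0
  else
    let users := roleIdxs messages "user"
    match users.getLast? with
    | none => max 0 ((messages.length : Int) - 1)
    | some last_user =>
      let a_before := (roleIdxs messages "assistant").filter (fun i => i < last_user)
      match a_before.getLast? with
      | none => (last_user : Int)
      | some assistant_index =>
        let u_before := users.filter (fun i => i < assistant_index)
        match u_before.getLast? with
        | some u => (u : Int)
        | none => (assistant_index : Int)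

-- ===== PRECONDITION & SPEC =====
def Spec_locate_tail_block_start_py (messages : List (List (String × String))) (out : Int) : Prop := out = locate_tail_block_start_py_alt messages
instance (messages : List (List (String × String))) (out : Int) : Decidable (Spec_locate_tail_block_start_py messages out) := by unfold Spec_locate_tail_block_start_py; infer_instance

-- ===== CLAIM (what is proved, stated in full; the proofs are below) =====
def Claim_equal_locate_tail_block_start_py : Prop := ∀ (messages : List (List (String × String))), Dom_locate_tail_block_start_py messages → Spec_locate_tail_block_start_py messages (locate_tail_block_start_py messages)

-- ===== LEMMAS AND PROOFS =====

-- A backward search from n-1 finds exactly the last qualifying index below n.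
theorem findBack_eq_getLast (msgs : List (List (String × String))) (r : String) (n : Nat) :
    findBack msgs r n = ((List.range n).filter (fun i => roleIs (msgs.getD i []) r)).getLast? := by
  induction n with
  | zero => simp [findBack]
  | succ n ih =>
    rw [findBack, List.range_succ, List.filter_append, ih]
    by_cases h : roleIs (msgs.getD n []) r
    · rw [if_pos h]
      have h1 : List.filter (fun i => roleIs (msgs.getD i []) r) [n] = [n] := by
        simp only [List.filter_singleton, h, cond_true]
      rw [h1, List.getLast?_concat]
    · rw [if_neg h]
      rw [Bool.not_eq_true] at h
      have h1 : List.filter (fun i => roleIs (msgs.getD i []) r) [n] = [] := by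
        simp only [List.filter_singleton, h, cond_false]
      rw [h1, List.append_nil]

-- Filtering the qualifying indices below n is filtering range n, when n ≤ length.
theorem filter_lt_roleIdxs (msgs : List (List (String × String))) (r : String) (n : Nat)
    (hn : n ≤ msgs.length) :
    (roleIdxs msgs r).filter (fun i => i < n)
      = (List.range n).filter (fun i => roleIs (msgs.getD i []) r) := by
  unfold roleIdxs
  rw [List.filter_filter]
  obtain ⟨k, hk⟩ := Nat.exists_eq_add_of_le hn
  rw [hk, List.range_add, List.filter_append]
  have h1 : (List.range n).filter (fun i => decide (i < n) && roleIs (msgs.getD i []) r)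
      = (List.range n).filter (fun i => roleIs (msgs.getD i []) r) := by
    apply List.filter_congr
    intro i hi
    simp [List.mem_range.mp hi]
  have h2 : ((List.range k).map (fun i => n + i)).filter
      (fun i => decide (i < n) && roleIs (msgs.getD i []) r) = [] := by
    apply List.filter_eq_nil_iff.mpr
    intro i hi
    obtain ⟨j, _, rfl⟩ := List.mem_map.mp hi
    simp
  rw [h1, h2, List.append_nil]

theorem getLast?_roleIdxs (msgs : List (List (String × String))) (r : String) :
    (roleIdxs msgs r).getLast? = findBack msgs r msgs.length := by
  rw [findBack_eq_getLast]; rfl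

theorem mem_roleIdxs_lt (msgs : List (List (String × String))) (r : String) {i : Nat}
    (h : i ∈ roleIdxs msgs r) : i < msgs.length := by
  unfold roleIdxs at h
  exact List.mem_range.mp (List.mem_of_mem_filter h)

-- ===== VERDICT (by name: the statement is the Claim_ definition above) =====
theorem locate_tail_block_start_py_spec : Claim_equal_locate_tail_block_start_py := by
  intro messages _
  unfold Spec_locate_tail_block_start_py locate_tail_block_start_py locate_tail_block_start_py_alt
  by_cases hemp : messages.isEmpty
  · simp [hemp]
  · simp only [hemp]
    rw [← getLast?_roleIdxs]
    cases hu : (roleIdxs messages "user").getLast? with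
    | none => rfl
    | some lu =>
      dsimp only
      have hlu : lu < messages.length :=
        mem_roleIdxs_lt messages "user" (List.mem_of_getLast? hu)
      rw [filter_lt_roleIdxs messages "assistant" lu (Nat.le_of_lt hlu),
          ← findBack_eq_getLast]
      cases ha : findBack messages "assistant" lu with
      | none => rfl
      | some ai =>
        dsimp only
        have hai : ai < lu := by
          have := List.mem_of_getLast? ((findBack_eq_getLast messages "assistant" lu) ▸ ha)
          exact List.mem_range.mp (List.mem_of_mem_filter this)
        rw [filter_lt_roleIdxs messages "user" ai (Nat.le_of_lt (hai.trans hlu)),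
            ← findBack_eq_getLast]
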